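-- pv_equiv track=rewrite | github.com/ourSSUNG/CodeSignalPractice | InterviewPractice/DataStructure/HeapsStacksQueues/(HARD)nearestGreater.py | nearestGreater
-- ===== SOURCE A (Python) =====
-- def leftGreater(a):
--     ans = [-1]
--     n = len(a)
--     stack = [[a[0],0]]
--     for i in range(1,n):
--         tmp = a[i]
--         check = i
--         while(len(stack)!=0):
--             if stack[0][0] <= tmp:
--                 stack.pop(0)
--             else:
--                 check = stack[0][1]
--                 break
--         if check == i:
--             ans.append(-1)
--             stack.insert(0,[a[i],i])
--         else:
--             ans.append(stack[0][1])
--             stack.insert(0,[a[i],i])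
--     return ans
--
-- def rightGreater(a):
--     a.reverse()
--     ans = [-1]
--     n = len(a)
--     stack = [[a[0],0]]
--     for i in range(1,n):
--         tmp = a[i]
--         check = i
--         while(len(stack)!=0):
--             if stack[0][0] <= tmp:
--                 stack.pop(0)
--             else:
--                 check = stack[0][1]
--                 break
--         if check == i:
--             ans.append(-1)
--             stack.insert(0,[a[i],i])
--         else:
--             ans.append(n-1-stack[0][1])
--             stack.insert(0,[a[i],i])
--     ans.reverse()
--     return ans
--
-- def nearestGreater(a):
--     left = leftGreater(a)
--     right = rightGreater(a)
--     n = len(a)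
--     ans = []
--     for i in range(0,n):
--         if left[i] == -1:
--             ans.append(right[i])
--             continue
--         if right[i] == -1:
--             ans.append(left[i])
--             continue
--
--         if i - left[i] <= right[i] -i:
--             ans.append(left[i])
--         else:
--             ans.append(right[i])
--     return ans
-- ===== SOURCE B (Python) =====
-- def nearestGreater(a):
--     n = len(a)
--     left = [-1] * n
--     for i in range(n):
--         j = i - 1
--         while j != -1 and a[j] <= a[i]:
--             j = left[j]
--         left[i] = j
--     right = [-1] * n
--     for i in range(n - 1, -1, -1):
--         j = i + 1 if i + 1 < n else -1
--         while j != -1 and a[j] <= a[i]: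
--             j = right[j]
--         right[i] = j
--     ans = []
--     for i in range(n):
--         l, r = left[i], right[i]
--         if l == -1:
--             ans.append(r)
--         elif r == -1 or i - l <= r - i:
--             ans.append(l)
--         else:
--             ans.append(r)
--     return ans
-- ===== Notes on version B (the rewrite author's own statement) =====
-- stated objective: faster
-- what changed: Replaced A's three monotonic-stack passes (front-of-list stacks with pop(0)/insert(0) and an in-place reversal of the input) by a stackless pointer-jumping scheme: each pass stores its answers in an array and finds the nearest greater element for i by chasing the already-computed answer links (j = left[j] / j = right[j]), which skips over whole blocks of smaller elements; B also does not mutate its argument (A reverses a in place).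
import Mathlib
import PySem

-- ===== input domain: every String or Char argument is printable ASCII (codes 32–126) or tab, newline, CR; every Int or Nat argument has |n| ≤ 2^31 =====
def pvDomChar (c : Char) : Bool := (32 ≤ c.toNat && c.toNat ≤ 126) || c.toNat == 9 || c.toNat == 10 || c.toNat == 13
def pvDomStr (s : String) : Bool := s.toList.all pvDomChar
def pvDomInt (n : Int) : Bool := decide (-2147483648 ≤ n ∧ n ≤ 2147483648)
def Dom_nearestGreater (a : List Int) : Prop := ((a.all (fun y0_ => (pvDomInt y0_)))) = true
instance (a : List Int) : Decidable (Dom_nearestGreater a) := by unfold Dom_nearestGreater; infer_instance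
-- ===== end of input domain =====

-- B replaces A's front-of-list monotonic stacks (pop(0)/insert(0)) and in-place reversal by a
-- stackless pointer-jumping scheme chasing the already-computed answer links; the equivalence is
-- about the RETURN value only: A reverses its argument in place, B does not mutate it.

-- ===== PORT A =====
-- the inner while loop of left/rightGreater: pop from the front while the stored value ≤ tmp
def pvPopA (tmp : Int) : List (Int × Int) → List (Int × Int)
  | [] => []
  | (v, j) :: rest => if v ≤ tmp then pvPopA tmp rest else (v, j) :: rest

-- shared body of the loops of leftGreater/rightGreater; g is what the else-branch appends of the
-- found index (identity in leftGreater, n-1-· in rightGreater)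
def pvStepA (b : List Int) (g : Int → Int) (s : List Int × List (Int × Int)) (i : Int) :
    List Int × List (Int × Int) :=
  let tmp := PySem.List.pyGetD b i 0
  let stack' := pvPopA tmp s.2
  let check : Int := (stack'.map Prod.snd).headD i
  if check = i then (s.1 ++ [-1], (tmp, i) :: stack')
  else (s.1 ++ [g check], (tmp, i) :: stack')

def leftGreater (a : List Int) : List Int :=
  ((PySem.List.pyRange 1 (a.length : Int) 1).foldl (pvStepA a (fun j => j))
      ([-1], [(PySem.List.pyGetD a 0 0, 0)])).1

def rightGreater (a : List Int) : List Int :=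
  (((PySem.List.pyRange 1 (a.reverse.length : Int) 1).foldl
      (pvStepA a.reverse (fun j => (a.reverse.length : Int) - 1 - j))
      ([-1], [(PySem.List.pyGetD a.reverse 0 0, 0)])).1).reverse

def nearestGreater (a : List Int) : List Int :=
  (PySem.List.pyRange 0 (a.length : Int) 1).foldl (fun ans i =>
    if PySem.List.pyGetD (leftGreater a) i 0 = -1 then
      ans ++ [PySem.List.pyGetD (rightGreater a) i 0]
    else if PySem.List.pyGetD (rightGreater a) i 0 = -1 then
      ans ++ [PySem.List.pyGetD (leftGreater a) i 0]
    else if i - PySem.List.pyGetD (leftGreater a) i 0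
        ≤ PySem.List.pyGetD (rightGreater a) i 0 - i then
      ans ++ [PySem.List.pyGetD (leftGreater a) i 0]
    else ans ++ [PySem.List.pyGetD (rightGreater a) i 0]) []

-- ===== PORT B =====
-- B's inner while loop 'while j != -1 and a[j] <= x: j = lnk[j]'; the fuel argument only
-- totalizes the while loop (the links strictly descend resp. ascend, so fuel n+1 is never spent)
def pvChase (a lnk : List Int) (x : Int) : Nat → Int → Int
  | 0, j => j
  | fuel + 1, j =>
      if j = -1 then j
      else if PySem.List.pyGetD a j 0 ≤ x then pvChase a lnk x fuel (PySem.List.pyGetD lnk j (-1))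
      else j

-- B's first pass: left = [-1]*n; for i in range(n): chase from i-1; left[i] = j
def pvLeftB (a : List Int) : List Int :=
  (PySem.List.pyRange 0 (a.length : Int) 1).foldl
    (fun lft i =>
      PySem.List.pySetD lft i (pvChase a lft (PySem.List.pyGetD a i 0) (a.length + 1) (i - 1)))
    (List.replicate a.length (-1))

-- B's second pass: right = [-1]*n; for i in range(n-1,-1,-1): chase from i+1 (or -1); right[i] = j
def pvRightB (a : List Int) : List Int :=
  (PySem.List.pyRange ((a.length : Int) - 1) (-1) (-1)).foldl
    (fun rgt i =>
      PySem.List.pySetD rgt i (pvChase a rgt (PySem.List.pyGetD a i 0) (a.length + 1)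
        (if i + 1 < (a.length : Int) then i + 1 else -1)))
    (List.replicate a.length (-1))

def nearestGreater_alt (a : List Int) : List Int :=
  (PySem.List.pyRange 0 (a.length : Int) 1).foldl (fun ans i =>
    let l := PySem.List.pyGetD (pvLeftB a) i 0
    let r := PySem.List.pyGetD (pvRightB a) i 0
    if l = -1 then ans ++ [r]
    else if r = -1 ∨ i - l ≤ r - i then ans ++ [l]
    else ans ++ [r]) []

-- ===== PRECONDITION & SPEC =====
-- A indexes the first element before its loops, so it raises IndexError exactly on the empty list.
def Pre_nearestGreater (a : List Int) : Prop := a ≠ []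
instance (a : List Int) : Decidable (Pre_nearestGreater a) := by unfold Pre_nearestGreater; infer_instance
def pvWitness_nearestGreater : List Int := [3, 1, 2]

def Spec_nearestGreater (a : List Int) (out : List Int) : Prop := out = nearestGreater_alt a
instance (a : List Int) (out : List Int) : Decidable (Spec_nearestGreater a out) := by unfold Spec_nearestGreater; infer_instance

-- ===== CLAIM (what is proved, stated in full; the proofs are below) =====
def Claim_equal_nearestGreater : Prop := ∀ (a : List Int), Dom_nearestGreater a → Pre_nearestGreater a → Spec_nearestGreater a (nearestGreater a)

-- ===== LEMMAS AND PROOFS =====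

-- the common specification both programs are reduced to: first index below/above with a
-- strictly greater value (-1 when none)
def fndDn (a : List Int) (x j : Int) : Int :=
  ((PySem.List.pyRange j (-1) (-1)).find?
    (fun k => decide (x < PySem.List.pyGetD a k 0))).getD (-1)

def fndUp (a : List Int) (x j n : Int) : Int :=
  ((PySem.List.pyRange j n 1).find?
    (fun k => decide (x < PySem.List.pyGetD a k 0))).getD (-1)

def ngL (a : List Int) (i : Int) : Int := fndDn a (PySem.List.pyGetD a i 0) (i - 1)
def ngR (a : List Int) (i : Int) : Int :=
  fndUp a (PySem.List.pyGetD a i 0) (i + 1) (a.length : Int)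

-- ---- facts about fndDn ----
theorem fndDn_nil (a : List Int) (x j : Int) (h : j ≤ -1) : fndDn a x j = -1 := by
  unfold fndDn
  rw [PySem.List.pyRange_neg_one_eq_nil h]
  rfl

theorem fndDn_cons (a : List Int) (x j : Int) (h : 0 ≤ j) :
    fndDn a x j = if PySem.List.pyGetD a j 0 ≤ x then fndDn a x (j - 1) else j := by
  unfold fndDn
  rw [PySem.List.pyRange_neg_one_cons (by omega : (-1 : Int) < j)]
  by_cases hj : PySem.List.pyGetD a j 0 ≤ x
  · rw [List.find?_cons_of_neg (by simpa using hj), if_pos hj]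
  · rw [List.find?_cons_of_pos (by simpa using not_le.mp hj), if_neg hj]
    rfl

theorem fndDn_bounds (a : List Int) (x : Int) : ∀ (j : Int), -1 ≤ j →
    -1 ≤ fndDn a x j ∧ fndDn a x j ≤ j := by
  intro j hj
  induction hn : (j + 1).toNat generalizing j with
  | zero =>
      have : j = -1 := by omega
      subst this
      rw [fndDn_nil a x _ le_rfl]
      omega
  | succ m ih =>
      have hj0 : 0 ≤ j := by omega
      rw [fndDn_cons a x j hj0]
      split
      · have := ih (j - 1) (by omega) (by omega)
        omega
      · omega

theorem fndDn_mid (a : List Int) (x : Int) : ∀ (j : Int), -1 ≤ j →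
    ∀ k, fndDn a x j < k → k ≤ j → PySem.List.pyGetD a k 0 ≤ x := by
  intro j hj
  induction hn : (j + 1).toNat generalizing j with
  | zero =>
      intro k hk1 hk2
      rw [fndDn_nil a x j (by omega)] at hk1
      omega
  | succ m ih =>
      have hj0 : 0 ≤ j := by omega
      intro k hk1 hk2
      rw [fndDn_cons a x j hj0] at hk1
      by_cases hc : PySem.List.pyGetD a j 0 ≤ x
      · rw [if_pos hc] at hk1
        by_cases hkj : k = j
        · subst hkj; exact hc
        · exact ih (j - 1) (by omega) (by omega) k hk1 (by omega)
      · rw [if_neg hc] at hk1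
        omega

theorem fndDn_congr (a : List Int) (x : Int) : ∀ (j j' : Int), -1 ≤ j' → j' ≤ j →
    (∀ k, j' < k → k ≤ j → PySem.List.pyGetD a k 0 ≤ x) → fndDn a x j = fndDn a x j' := by
  intro j j' hj' hle hmid
  induction hn : (j - j').toNat generalizing j with
  | zero =>
      have : j = j' := by omega
      rw [this]
  | succ m ih =>
      have hj0 : 0 ≤ j := by omega
      rw [fndDn_cons a x j hj0, if_pos (hmid j (by omega) le_rfl)]
      exact ih (j - 1) (by omega) (fun k h1 h2 => hmid k h1 (by omega)) (by omega)

-- ---- facts about fndUp ----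
theorem fndUp_nil (a : List Int) (x j n : Int) (h : n ≤ j) : fndUp a x j n = -1 := by
  unfold fndUp
  have : PySem.List.pyRange j n 1 = [] := by
    have := PySem.List.length_pyRange_one j n
    exact List.eq_nil_of_length_eq_zero (by omega)
  rw [this]
  rfl

theorem fndUp_cons (a : List Int) (x j n : Int) (h : j < n) :
    fndUp a x j n = if PySem.List.pyGetD a j 0 ≤ x then fndUp a x (j + 1) n else j := by
  unfold fndUp
  rw [PySem.List.pyRange_one_cons h]
  by_cases hj : PySem.List.pyGetD a j 0 ≤ x
  · rw [List.find?_cons_of_neg (by simpa using hj), if_pos hj]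
  · rw [List.find?_cons_of_pos (by simpa using not_le.mp hj), if_neg hj]
    rfl

theorem fndUp_bounds (a : List Int) (x n : Int) : ∀ (j : Int), j ≤ n →
    fndUp a x j n = -1 ∨ (j ≤ fndUp a x j n ∧ fndUp a x j n < n) := by
  intro j hj
  induction hn : (n - j).toNat generalizing j with
  | zero =>
      left
      exact fndUp_nil a x j n (by omega)
  | succ m ih =>
      have hjn : j < n := by omega
      rw [fndUp_cons a x j n hjn]
      split
      · rcases ih (j + 1) (by omega) (by omega) with h | h
        · left; exact h
        · right; omega
      · right; omega

theorem fndUp_mid (a : List Int) (x n : Int) : ∀ (j : Int), 0 ≤ j → j ≤ n →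
    ∀ k, j ≤ k → k < fndUp a x j n → PySem.List.pyGetD a k 0 ≤ x := by
  intro j hj0 hj
  induction hn : (n - j).toNat generalizing j with
  | zero =>
      intro k hk1 hk2
      rw [fndUp_nil a x j n (by omega)] at hk2
      omega
  | succ m ih =>
      have hjn : j < n := by omega
      intro k hk1 hk2
      rw [fndUp_cons a x j n hjn] at hk2
      by_cases hc : PySem.List.pyGetD a j 0 ≤ x
      · rw [if_pos hc] at hk2
        by_cases hkj : k = j
        · subst hkj; exact hc
        · exact ih (j + 1) (by omega) (by omega) (by omega) k (by omega) hk2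
      · rw [if_neg hc] at hk2
        omega

theorem fndUp_neg (a : List Int) (x n : Int) : ∀ (j : Int), 0 ≤ j → j ≤ n →
    fndUp a x j n = -1 → ∀ k, j ≤ k → k < n → PySem.List.pyGetD a k 0 ≤ x := by
  intro j hj0 hj
  induction hn : (n - j).toNat generalizing j with
  | zero =>
      intro _ k hk1 hk2
      omega
  | succ m ih =>
      have hjn : j < n := by omega
      intro hneg k hk1 hk2
      rw [fndUp_cons a x j n hjn] at hneg
      by_cases hc : PySem.List.pyGetD a j 0 ≤ x
      · rw [if_pos hc] at hneg
        by_cases hkj : k = j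
        · subst hkj; exact hc
        · exact ih (j + 1) (by omega) (by omega) (by omega) hneg k (by omega) hk2
      · rw [if_neg hc] at hneg
        omega

theorem fndUp_congr (a : List Int) (x n : Int) : ∀ (j j' : Int), j ≤ j' → j' ≤ n →
    (∀ k, j ≤ k → k < j' → PySem.List.pyGetD a k 0 ≤ x) → fndUp a x j n = fndUp a x j' n := by
  intro j j' hle hj' hmid
  induction hn : (j' - j).toNat generalizing j with
  | zero =>
      have : j = j' := by omega
      rw [this]
  | succ m ih =>
      have hjn : j < n := by omega
      rw [fndUp_cons a x j n hjn, if_pos (hmid j le_rfl (by omega))]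
      exact ih (j + 1) (by omega) (fun k h1 h2 => hmid k (by omega) h2) (by omega)

-- ---- the chase computes fndDn / fndUp ----
theorem pvChase_neg_one (a lnk : List Int) (x : Int) (fuel : Nat) :
    pvChase a lnk x fuel (-1) = -1 := by
  cases fuel <;> simp [pvChase]

theorem pvChase_dn (a lnk : List Int) (x m : Int)
    (hlnk : ∀ k : Int, 0 ≤ k → k < m → PySem.List.pyGetD lnk k (-1) = ngL a k) :
    ∀ (fuel : Nat) (j : Int), -1 ≤ j → j < m → (j + 1).toNat < fuel →
    pvChase a lnk x fuel j = fndDn a x j := by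
  intro fuel
  induction fuel with
  | zero => intro j _ _ h; omega
  | succ f ih =>
      intro j hj hjm hfuel
      by_cases hj1 : j = -1
      · subst hj1
        rw [pvChase_neg_one, fndDn_nil a x _ le_rfl]
      · have hj0 : 0 ≤ j := by omega
        show (if j = -1 then j
          else if PySem.List.pyGetD a j 0 ≤ x then
            pvChase a lnk x f (PySem.List.pyGetD lnk j (-1))
          else j) = fndDn a x j
        rw [if_neg hj1]
        by_cases hc : PySem.List.pyGetD a j 0 ≤ x
        · rw [if_pos hc, hlnk j hj0 hjm]
          have hb := fndDn_bounds a (PySem.List.pyGetD a j 0) (j - 1) (by omega)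
          have hbl : -1 ≤ ngL a j ∧ ngL a j ≤ j - 1 := hb
          rw [ih (ngL a j) hbl.1 (by omega) (by omega)]
          rw [fndDn_cons a x j hj0, if_pos hc]
          exact (fndDn_congr a x (j - 1) (ngL a j) hbl.1 hbl.2
            (fun k h1 h2 => le_trans (fndDn_mid a (PySem.List.pyGetD a j 0) (j - 1) (by omega) k h1 h2) hc)).symm
        · rw [if_neg hc, fndDn_cons a x j hj0, if_neg hc]

theorem pvChase_up (a lnk : List Int) (x m : Int) (hm : 0 ≤ m)
    (hlnk : ∀ k : Int, m < k → k < (a.length : Int) → PySem.List.pyGetD lnk k (-1) = ngR a k) :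
    ∀ (fuel : Nat) (j : Int), m < j → j < (a.length : Int) → ((a.length : Int) - j).toNat < fuel →
    pvChase a lnk x fuel j = fndUp a x j (a.length : Int) := by
  intro fuel
  induction fuel with
  | zero => intro j _ hj h; omega
  | succ f ih =>
      intro j hjm hjn hfuel
      have hj0 : 0 ≤ j := by omega
      show (if j = -1 then j
        else if PySem.List.pyGetD a j 0 ≤ x then
          pvChase a lnk x f (PySem.List.pyGetD lnk j (-1))
        else j) = fndUp a x j (a.length : Int)
      rw [if_neg (by omega : ¬ j = -1)]
      by_cases hc : PySem.List.pyGetD a j 0 ≤ x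
      · rw [if_pos hc, hlnk j hjm hjn]
        have hb := fndUp_bounds a (PySem.List.pyGetD a j 0) (a.length : Int) (j + 1) (by omega)
        rcases hb with hneg | hpos
        · -- no greater element above j at all: both sides are -1
          rw [show ngR a j = -1 from hneg, pvChase_neg_one]
          rw [fndUp_congr a x (a.length : Int) j (a.length : Int) (by omega) le_rfl
            (fun k h1 h2 => by
              by_cases hkj : k = j
              · subst hkj; exact hc
              · exact le_trans
                  (fndUp_neg a (PySem.List.pyGetD a j 0) (a.length : Int) (j + 1) (by omega) (by omega)
                    hneg k (by omega) h2) hc)]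
          exact (fndUp_nil a x _ _ le_rfl).symm
        · have h1 : j + 1 ≤ ngR a j := hpos.1
          have h2 : ngR a j < (a.length : Int) := hpos.2
          rw [ih (ngR a j) (by omega) h2 (by omega)]
          exact (fndUp_congr a x (a.length : Int) j (ngR a j) (by omega) (by omega)
            (fun k hk1 hk2 => by
              by_cases hkj : k = j
              · subst hkj; exact hc
              · exact le_trans
                  (fndUp_mid a (PySem.List.pyGetD a j 0) (a.length : Int) (j + 1) (by omega) (by omega)
                    k (by omega) hk2) hc)).symm
      · rw [if_neg hc, fndUp_cons a x j _ hjn, if_neg hc]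

-- ---- B's passes compute ngL / ngR ----
-- the left fold after the first m iterations
def pvLeftFold (a : List Int) (m : Nat) : List Int :=
  (PySem.List.pyRange 0 (m : Int) 1).foldl
    (fun lft i =>
      PySem.List.pySetD lft i (pvChase a lft (PySem.List.pyGetD a i 0) (a.length + 1) (i - 1)))
    (List.replicate a.length (-1))

theorem pvLeftB_eq_fold (a : List Int) : pvLeftB a = pvLeftFold a a.length := rfl

theorem pvLeftFold_spec (a : List Int) : ∀ (m : Nat), m ≤ a.length →
    (pvLeftFold a m).length = a.length ∧
    (∀ (k : Nat) (d : Int), k < a.length →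
      PySem.List.pyGetD (pvLeftFold a m) (k : Int) d =
        if k < m then ngL a (k : Int) else -1) := by
  intro m
  induction m with
  | zero =>
      intro _
      constructor
      · simp [pvLeftFold, PySem.List.pyRange]
      · intro k d hk
        simp [pvLeftFold, PySem.List.pyRange, List.getD_eq_getElem?_getD, hk]
  | succ m ih =>
      intro hm
      obtain ⟨ihlen, ihget⟩ := ih (by omega)
      have hrange : PySem.List.pyRange 0 ((m + 1 : Nat) : Int) 1
          = PySem.List.pyRange 0 (m : Int) 1 ++ [(m : Int)] := by
        rw [show ((m + 1 : Nat) : Int) = (m : Int) + 1 by push_cast; ring]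
        exact PySem.List.pyRange_one_succ_right (by omega)
      have hstep : pvLeftFold a (m + 1)
          = PySem.List.pySetD (pvLeftFold a m) (m : Int)
              (pvChase a (pvLeftFold a m) (PySem.List.pyGetD a (m : Int) 0) (a.length + 1)
                ((m : Int) - 1)) := by
        unfold pvLeftFold
        rw [hrange, List.foldl_append]
        rfl
      have hchase : pvChase a (pvLeftFold a m) (PySem.List.pyGetD a (m : Int) 0) (a.length + 1)
          ((m : Int) - 1) = ngL a (m : Int) := by
        rw [pvChase_dn a (pvLeftFold a m) (PySem.List.pyGetD a (m : Int) 0) (m : Int)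
          (fun k hk0 hkm => by
            have hk : k = ((k.toNat : Nat) : Int) := by omega
            rw [hk, ihget k.toNat (-1) (by omega), if_pos (by omega)])
          (a.length + 1) ((m : Int) - 1) (by omega) (by omega) (by omega)]
        rfl
      rw [hstep, hchase]
      have hset : PySem.List.pySetD (pvLeftFold a m) (m : Int) (ngL a (m : Int))
          = (pvLeftFold a m).set m (ngL a (m : Int)) := by
        simp
      rw [hset]
      constructor
      · rw [List.length_set, ihlen]
      · intro k d hk
        rw [PySem.List.pyGetD_natCast, List.getD_eq_getElem?_getD, List.getElem?_set]
        by_cases hkm : m = k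
        · subst hkm
          rw [if_pos rfl, if_pos (by omega)]
          simp
        · rw [if_neg hkm, ← List.getD_eq_getElem?_getD, ← PySem.List.pyGetD_natCast,
            ihget k d hk]
          by_cases h1 : k < m
          · rw [if_pos h1, if_pos (by omega)]
          · rw [if_neg h1, if_neg (by omega)]

-- countdown twin of pyRange_one_succ_right
theorem pvRange_neg_one_succ_right (c b : Int) (h : b ≤ c) :
    PySem.List.pyRange c (b - 1) (-1) = PySem.List.pyRange c b (-1) ++ [b] := by
  rw [PySem.List.pyRange_neg_one_eq_reverse, PySem.List.pyRange_neg_one_eq_reverse,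
    show b - 1 + 1 = b by omega, PySem.List.pyRange_one_cons (by omega : b < c + 1)]
  simp

-- the right fold after processing the first t indices n-1, n-2, …, n-t
def pvRightFold (a : List Int) (t : Nat) : List Int :=
  (PySem.List.pyRange ((a.length : Int) - 1) ((a.length : Int) - 1 - (t : Int)) (-1)).foldl
    (fun rgt i =>
      PySem.List.pySetD rgt i (pvChase a rgt (PySem.List.pyGetD a i 0) (a.length + 1)
        (if i + 1 < (a.length : Int) then i + 1 else -1)))
    (List.replicate a.length (-1))

theorem pvRightB_eq_fold (a : List Int) : pvRightB a = pvRightFold a a.length := by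
  unfold pvRightB pvRightFold
  rw [show (a.length : Int) - 1 - (a.length : Int) = -1 by omega]

theorem pvRightFold_spec (a : List Int) : ∀ (t : Nat), t ≤ a.length →
    (pvRightFold a t).length = a.length ∧
    (∀ (k : Nat) (d : Int), k < a.length →
      PySem.List.pyGetD (pvRightFold a t) (k : Int) d =
        if (a.length : Int) - t ≤ k then ngR a (k : Int) else -1) := by
  intro t
  induction t with
  | zero =>
      intro _
      constructor
      · simp [pvRightFold]
      · intro k d hk
        rw [show ((0 : Nat) : Int) = 0 by rfl]
        simp [pvRightFold, List.getD_eq_getElem?_getD, hk]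
  | succ t ih =>
      intro ht
      obtain ⟨ihlen, ihget⟩ := ih (by omega)
      have hi0 : (0 : Int) ≤ (a.length : Int) - 1 - t := by omega
      have hrange : PySem.List.pyRange ((a.length : Int) - 1) ((a.length : Int) - 1 - ((t + 1 : Nat) : Int)) (-1)
          = PySem.List.pyRange ((a.length : Int) - 1) ((a.length : Int) - 1 - (t : Int)) (-1)
            ++ [(a.length : Int) - 1 - (t : Int)] := by
        rw [show (a.length : Int) - 1 - ((t + 1 : Nat) : Int)
            = ((a.length : Int) - 1 - (t : Int)) - 1 by push_cast; ring]
        exact pvRange_neg_one_succ_right _ _ (by omega)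
      set i : Int := (a.length : Int) - 1 - (t : Int) with hidef
      have hstep : pvRightFold a (t + 1)
          = PySem.List.pySetD (pvRightFold a t) i
              (pvChase a (pvRightFold a t) (PySem.List.pyGetD a i 0) (a.length + 1)
                (if i + 1 < (a.length : Int) then i + 1 else -1)) := by
        unfold pvRightFold
        rw [hrange, List.foldl_append]
        rfl
      have hlnk : ∀ k : Int, i < k → k < (a.length : Int) →
          PySem.List.pyGetD (pvRightFold a t) k (-1) = ngR a k := by
        intro k hk0 hkn
        have hk : k = ((k.toNat : Nat) : Int) := by omega
        rw [hk, ihget k.toNat (-1) (by omega), if_pos (by omega)]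
      have hchase : pvChase a (pvRightFold a t) (PySem.List.pyGetD a i 0) (a.length + 1)
          (if i + 1 < (a.length : Int) then i + 1 else -1) = ngR a i := by
        by_cases hin : i + 1 < (a.length : Int)
        · rw [if_pos hin]
          rw [pvChase_up a (pvRightFold a t) (PySem.List.pyGetD a i 0) i (by omega) hlnk
            (a.length + 1) (i + 1) (by omega) hin (by omega)]
          rfl
        · rw [if_neg hin, pvChase_neg_one]
          exact (fndUp_nil a (PySem.List.pyGetD a i 0) (i + 1) (a.length : Int) (by omega)).symm
      rw [hstep, hchase]
      have hset : PySem.List.pySetD (pvRightFold a t) i (ngR a i)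
          = (pvRightFold a t).set i.toNat (ngR a i) := by
        exact PySem.List.pySetD_of_nonneg _ _ (by omega)
      rw [hset]
      constructor
      · rw [List.length_set, ihlen]
      · intro k d hk
        rw [PySem.List.pyGetD_natCast, List.getD_eq_getElem?_getD, List.getElem?_set]
        by_cases hkm : i.toNat = k
        · rw [if_pos hkm, if_pos (by rw [ihlen]; omega)]
          have : (k : Int) = i := by omega
          rw [this]
          simp
          omega
        · rw [if_neg hkm, ← List.getD_eq_getElem?_getD, ← PySem.List.pyGetD_natCast,
            ihget k d hk]
          by_cases h1 : (a.length : Int) - t ≤ k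
          · rw [if_pos h1, if_pos (by push_cast; omega)]
          · rw [if_neg h1, if_neg (by push_cast; omega)]

-- ---- reduction of A's passes to the emit specification ----
-- proof-side clean core of A's stack passes: end-growing index stack
def pvPopB (a : List Int) (x : Int) : List Int → List Int
  | [] => []
  | j :: rest => if PySem.List.pyGetD a j 0 ≤ x then pvPopB a x rest else j :: rest

def pvStepB (a : List Int) (s : List Int × List Int) (i : Int) : List Int × List Int :=
  let st' := pvPopB a (PySem.List.pyGetD a i 0) s.2
  (s.1 ++ [st'.headD (-1)], i :: st')

def pvScanB (a : List Int) (idxs : List Int) : List Int :=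
  (idxs.foldl (pvStepB a) ([], [])).1

-- what one pass emits: for each index, the most recently seen strictly greater index
def pvEmit (a : List Int) : List Int → List Int → List Int
  | _, [] => []
  | seen, i :: rest =>
      ((seen.find? (fun k => decide (PySem.List.pyGetD a i 0 < PySem.List.pyGetD a k 0))).getD (-1))
        :: pvEmit a (i :: seen) rest

theorem pvPopB_pvPopB (a : List Int) (x y : Int) (h : y ≤ x) (st : List Int) :
    pvPopB a x (pvPopB a y st) = pvPopB a x st := by
  induction st with
  | nil => rfl
  | cons j rest ih =>
      by_cases hj : PySem.List.pyGetD a j 0 ≤ y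
      · rw [show pvPopB a y (j :: rest) = pvPopB a y rest by simp [pvPopB, hj], ih,
          show pvPopB a x (j :: rest) = pvPopB a x rest by simp [pvPopB, hj.trans h]]
      · rw [show pvPopB a y (j :: rest) = j :: rest by simp [pvPopB, hj]]

theorem pvScan_emit (a : List Int) : ∀ (idxs st seen out : List Int),
    (∀ x : Int, (pvPopB a x st).headD (-1)
      = (seen.find? (fun k => decide (x < PySem.List.pyGetD a k 0))).getD (-1)) →
    (idxs.foldl (pvStepB a) (out, st)).1 = out ++ pvEmit a seen idxs := by
  intro idxs
  induction idxs with
  | nil => intro st seen out _; simp [pvEmit]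
  | cons i rest ih =>
      intro st seen out hinv
      simp only [List.foldl_cons, pvStepB]
      rw [ih (i :: pvPopB a (PySem.List.pyGetD a i 0) st) (i :: seen) _
        (by
          intro x
          by_cases hx : PySem.List.pyGetD a i 0 ≤ x
          · rw [show pvPopB a x (i :: pvPopB a (PySem.List.pyGetD a i 0) st)
                = pvPopB a x (pvPopB a (PySem.List.pyGetD a i 0) st) by simp [pvPopB, hx],
              pvPopB_pvPopB a x _ hx st, hinv x,
              List.find?_cons_of_neg (by simpa using hx)]
          · rw [show pvPopB a x (i :: pvPopB a (PySem.List.pyGetD a i 0) st)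
                = i :: pvPopB a (PySem.List.pyGetD a i 0) st by simp [pvPopB, hx],
              List.find?_cons_of_pos (by simpa using not_le.mp hx)]
            rfl)]
      rw [pvEmit, hinv (PySem.List.pyGetD a i 0)]
      simp

theorem pvScanB_emit (a : List Int) (idxs : List Int) :
    pvScanB a idxs = pvEmit a [] idxs := by
  unfold pvScanB
  rw [pvScan_emit a idxs [] [] [] (fun x => rfl)]
  rfl

theorem pvEmit_left (a : List Int) : ∀ (cnt : Nat) (lo : Int), 0 ≤ lo →
    pvEmit a (PySem.List.pyRange (lo - 1) (-1) (-1)) (PySem.List.pyRange lo (lo + (cnt : Int)) 1)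
      = (PySem.List.pyRange lo (lo + (cnt : Int)) 1).map (fun i => ngL a i) := by
  intro cnt
  induction cnt with
  | zero =>
      intro lo _
      have : PySem.List.pyRange lo (lo + ((0 : Nat) : Int)) 1 = [] := by
        exact List.eq_nil_of_length_eq_zero (by rw [PySem.List.length_pyRange_one]; omega)
      rw [this]
      rfl
  | succ cnt ih =>
      intro lo hlo
      rw [PySem.List.pyRange_one_cons (by push_cast; omega : lo < lo + ((cnt + 1 : Nat) : Int))]
      rw [pvEmit, List.map_cons]
      congr 1
      rw [show lo :: PySem.List.pyRange (lo - 1) (-1) (-1)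
          = PySem.List.pyRange ((lo + 1) - 1) (-1) (-1) by
        rw [show lo + 1 - 1 = lo by omega, PySem.List.pyRange_neg_one_cons (by omega : (-1 : Int) < lo)]]
      rw [show lo + ((cnt + 1 : Nat) : Int) = (lo + 1) + ((cnt : Nat) : Int) by push_cast; ring]
      exact ih (lo + 1) (by omega)

theorem pvEmit_right (a : List Int) : ∀ (cnt : Nat) (hi : Int), hi < (a.length : Int) →
    pvEmit a (PySem.List.pyRange (hi + 1) (a.length : Int) 1)
        (PySem.List.pyRange hi (hi - (cnt : Int)) (-1))
      = (PySem.List.pyRange hi (hi - (cnt : Int)) (-1)).map (fun i => ngR a i) := by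
  intro cnt
  induction cnt with
  | zero =>
      intro hi _
      rw [PySem.List.pyRange_neg_one_eq_nil (by push_cast; omega)]
      rfl
  | succ cnt ih =>
      intro hi hhi
      rw [PySem.List.pyRange_neg_one_cons (by push_cast; omega : hi - ((cnt + 1 : Nat) : Int) < hi)]
      rw [pvEmit, List.map_cons]
      congr 1
      rw [show hi :: PySem.List.pyRange (hi + 1) (a.length : Int) 1
          = PySem.List.pyRange ((hi - 1) + 1) (a.length : Int) 1 by
        rw [show hi - 1 + 1 = hi by omega, PySem.List.pyRange_one_cons hhi]]
      rw [show hi - ((cnt + 1 : Nat) : Int) = (hi - 1) - ((cnt : Nat) : Int) by push_cast; ring]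
      exact ih (hi - 1) (by omega)

-- proof-side common core of both of A's monotonic-stack passes, over (value, tag) pairs
def pvCore (stack : List (Int × Int)) : List (Int × Int) → List Int
  | [] => []
  | (v, t) :: rest =>
      let st' := pvPopA v stack
      ((st'.map Prod.snd).headD (-1)) :: pvCore ((v, t) :: st') rest

theorem pvPopA_eq_map (a : List Int) (x : Int) (st : List Int) :
    pvPopA x (st.map (fun j => (PySem.List.pyGetD a j 0, j)))
      = (pvPopB a x st).map (fun j => (PySem.List.pyGetD a j 0, j)) := by
  induction st with
  | nil => rfl
  | cons j rest ih =>
      simp only [List.map_cons, pvPopA, pvPopB]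
      split <;> simp [ih]

theorem pvPopA_subset (x : Int) (st : List (Int × Int)) (p : Int × Int)
    (hp : p ∈ pvPopA x st) : p ∈ st := by
  induction st with
  | nil => simp [pvPopA] at hp
  | cons q rest ih =>
      obtain ⟨v, j⟩ := q
      simp only [pvPopA] at hp
      split at hp
      · exact List.mem_cons_of_mem _ (ih hp)
      · exact hp

-- A's proof-side clean scan is pvCore on the (value, tag) pairs
theorem pvScanB_core (a : List Int) (idxs : List Int) : ∀ (st out : List Int),
    (idxs.foldl (pvStepB a) (out, st)).1
      = out ++ pvCore (st.map (fun j => (PySem.List.pyGetD a j 0, j)))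
          (idxs.map (fun i => (PySem.List.pyGetD a i 0, i))) := by
  induction idxs with
  | nil => intro st out; simp [pvCore]
  | cons i rest ih =>
      intro st out
      simp only [List.foldl_cons, List.map_cons, pvCore, pvStepB]
      rw [ih, pvPopA_eq_map]
      cases h : pvPopB a (PySem.List.pyGetD a i 0) st with
      | nil => simp
      | cons j rest' => simp

-- A's loop is pvCore with g applied to every found (non-(-1)) emitted tag
theorem pvFoldA_core (b : List Int) (g : Int → Int) (idxs : List (Int)) :
    ∀ (stack : List (Int × Int)) (ans : List Int),
    idxs.Pairwise (· ≠ ·) →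
    (∀ p ∈ stack, (∀ i ∈ idxs, p.2 ≠ i) ∧ p.2 ≠ -1) →
    (∀ i ∈ idxs, i ≠ -1) →
    (idxs.foldl (pvStepA b g) (ans, stack)).1
      = ans ++ (pvCore stack (idxs.map (fun i => (PySem.List.pyGetD b i 0, i)))).map
          (fun x => if x = -1 then -1 else g x) := by
  induction idxs with
  | nil => intro stack ans _ _ _; simp [pvCore]
  | cons i rest ih =>
      intro stack ans hpw hst hne
      have hpw' := (List.pairwise_cons.mp hpw)
      simp only [List.foldl_cons, List.map_cons, pvCore, pvStepA]
      have hstack' : ∀ p ∈ pvPopA (PySem.List.pyGetD b i 0) stack,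
          (∀ i' ∈ rest, p.2 ≠ i') ∧ p.2 ≠ -1 := by
        intro p hp
        have := hst p (pvPopA_subset _ _ _ hp)
        exact ⟨fun i' hi' => (this.1 i' (List.mem_cons_of_mem _ hi')), this.2⟩
      cases h : pvPopA (PySem.List.pyGetD b i 0) stack with
      | nil =>
          simp only [List.map_nil, List.headD_nil, if_pos trivial]
          rw [ih _ _ hpw'.2
            (by
              intro p hp
              rcases List.mem_cons.mp hp with h1 | h1
              · subst h1
                exact ⟨fun i' hi' => hpw'.1 i' hi', hne i List.mem_cons_self⟩
              · simp only [List.mem_nil_iff] at h1)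
            (fun i' hi' => hne i' (List.mem_cons_of_mem _ hi'))]
          norm_num
      | cons p rest' =>
          have hpmem : p ∈ stack := pvPopA_subset _ _ _ (by rw [h]; exact List.mem_cons_self ..)
          have hpne : p.2 ≠ i := (hst p hpmem).1 i List.mem_cons_self
          have hpne1 : p.2 ≠ -1 := (hst p hpmem).2
          simp only [List.map_cons, List.headD_cons]
          rw [if_neg hpne]
          rw [ih _ _ hpw'.2
            (by
              intro q hq
              rcases List.mem_cons.mp hq with h1 | h1
              · subst h1
                exact ⟨fun i' hi' => hpw'.1 i' hi', hne i List.mem_cons_self⟩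
              · exact hstack' q (by rw [h]; exact h1))
            (fun i' hi' => hne i' (List.mem_cons_of_mem _ hi'))]
          simp [hpne1]

-- pvCore ignores the tags: transporting every tag through h maps the output through h off -1
theorem pvCore_map_tags (h : Int → Int) (l : List (Int × Int)) :
    ∀ stack, (∀ p ∈ stack, p.2 ≠ -1) → (∀ p ∈ l, p.2 ≠ -1) →
    pvCore (stack.map (fun p => (p.1, h p.2))) (l.map (fun p => (p.1, h p.2)))
      = (pvCore stack l).map (fun x => if x = -1 then -1 else h x) := by
  induction l with
  | nil => intro stack _ _; rfl
  | cons q rest ih =>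
      intro stack hstack hl
      obtain ⟨v, t⟩ := q
      simp only [List.map_cons, pvCore]
      have hpop : pvPopA v (stack.map (fun p => (p.1, h p.2)))
          = (pvPopA v stack).map (fun p => (p.1, h p.2)) := by
        clear hstack
        induction stack with
        | nil => rfl
        | cons r rs ihs =>
            obtain ⟨rv, rt⟩ := r
            simp only [List.map_cons, pvPopA]
            split <;> simp [ihs]
      rw [hpop]
      have hrec := ih ((v, t) :: pvPopA v stack)
        (by
          intro p hp
          rcases List.mem_cons.mp hp with h1 | h1
          · subst h1; exact hl (v, t) List.mem_cons_self
          · exact hstack p (pvPopA_subset _ _ _ h1))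
        (fun p hp => hl p (List.mem_cons_of_mem _ hp))
      cases hc : pvPopA v stack with
      | nil =>
          rw [hc] at hrec
          simp only [List.map_cons, List.map_nil] at hrec ⊢
          rw [hrec]
          norm_num
      | cons p rest' =>
          have hpne : p.2 ≠ -1 := hstack p (pvPopA_subset _ _ _ (by rw [hc]; exact List.mem_cons_self ..))
          simpa [hc, hpne] using hrec

-- pyGetD on a reversed list
theorem pvGetD_reverse (a : List Int) (i : Int) (h0 : 0 ≤ i) (h1 : i < (a.length : Int)) :
    PySem.List.pyGetD a.reverse i 0 = PySem.List.pyGetD a ((a.length : Int) - 1 - i) 0 := by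
  rw [PySem.List.pyGetD_eq_getElem a.reverse 0 h0 (by simpa using h1),
      PySem.List.pyGetD_eq_getElem a 0 (by omega) (by omega)]
  rw [List.getElem_reverse]
  congr 1
  omega

-- [n-2, …, 0] is [1, …, n-1] mapped through n-1-·
theorem pvRevRange (n : Int) (hn : 0 < n) :
    (PySem.List.pyRange 0 (n - 1) 1).reverse
      = (PySem.List.pyRange 1 n 1).map (fun i => n - 1 - i) := by
  apply List.ext_getElem
  · simp [PySem.List.length_pyRange_one]
  · intro k h1 h2
    have hk : k < (n - 1).toNat := by
      simpa [PySem.List.length_pyRange_one] using h1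
    rw [List.getElem_reverse, List.getElem_map, PySem.List.getElem_pyRange_one,
        PySem.List.getElem_pyRange_one]
    simp only [PySem.List.length_pyRange_one]
    omega

-- A's left pass equals the clean scan
theorem pvLeft_eq (a : List Int) (h : a ≠ []) :
    leftGreater a = pvScanB a (PySem.List.pyRange 0 (a.length : Int) 1) := by
  have hn : (0 : Int) < (a.length : Int) := by
    have := List.length_pos_iff.mpr h; exact_mod_cast this
  unfold leftGreater pvScanB
  rw [PySem.List.pyRange_one_cons hn]
  simp only [List.foldl_cons]
  have hstep : pvStepB a ([], []) 0 = ([-1], [0]) := by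
    simp [pvStepB, pvPopB]
  rw [hstep, pvScanB_core,
      pvFoldA_core a (fun j => j) _ _ _
        (PySem.List.nodup_pyRange_one 1 ((a.length : Int)))
        (by
          intro p hp
          simp only [List.mem_singleton] at hp
          subst hp
          refine ⟨fun i hi => ?_, by norm_num⟩
          have := (PySem.List.mem_pyRange_one.mp hi).1
          omega)
        (by
          intro i hi
          have := (PySem.List.mem_pyRange_one.mp hi).1
          omega)]
  have hid : (fun x : Int => if x = -1 then -1 else x) = id := by
    funext x; by_cases hx : x = -1 <;> simp [hx]
  simp [hid]

-- A's right pass equals the clean scan over the countdown range, reversed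
theorem pvRight_eq (a : List Int) (h : a ≠ []) :
    rightGreater a = (pvScanB a (PySem.List.pyRange ((a.length : Int) - 1) (-1) (-1))).reverse := by
  have hn : (0 : Int) < (a.length : Int) := by
    have := List.length_pos_iff.mpr h; exact_mod_cast this
  unfold rightGreater pvScanB
  congr 1
  rw [pvFoldA_core a.reverse (fun j => (a.reverse.length : Int) - 1 - j) _ _ _
        (PySem.List.nodup_pyRange_one 1 _)
        (by
          intro p hp
          simp only [List.mem_singleton] at hp
          subst hp
          refine ⟨fun i hi => ?_, by norm_num⟩
          have h2 := (PySem.List.mem_pyRange_one.mp hi).1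
          omega)
        (by
          intro i hi
          have h2 := (PySem.List.mem_pyRange_one.mp hi).1
          omega)]
  rw [PySem.List.pyRange_neg_one_cons (by omega : (-1 : Int) < (a.length : Int) - 1)]
  simp only [List.foldl_cons]
  have hstep : pvStepB a ([], []) ((a.length : Int) - 1) = ([-1], [(a.length : Int) - 1]) := by
    simp [pvStepB, pvPopB]
  rw [hstep, pvScanB_core]
  simp only [List.length_reverse, List.map_cons, List.map_nil]
  -- rewrite the descending-range side into the mapped ascending range
  have hlist : (PySem.List.pyRange ((a.length : Int) - 1 - 1) (-1) (-1)).map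
        (fun i => (PySem.List.pyGetD a i 0, i))
      = ((PySem.List.pyRange 1 (a.length : Int) 1).map
          (fun i => (PySem.List.pyGetD a.reverse i 0, i))).map
          (fun p => (p.1, (a.length : Int) - 1 - p.2)) := by
    have h1 : PySem.List.pyRange ((a.length : Int) - 1 - 1) (-1) (-1)
        = (PySem.List.pyRange 0 ((a.length : Int) - 1) 1).reverse := by
      rw [PySem.List.pyRange_neg_one_eq_reverse]
      norm_num
    rw [h1, pvRevRange _ hn, List.map_map, List.map_map]
    apply List.map_congr_left
    intro i hi
    have hb := PySem.List.mem_pyRange_one.mp hi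
    simp only [Function.comp]
    rw [pvGetD_reverse a i (by omega) (by omega)]
  have hstack0 : PySem.List.pyGetD a ((a.length : Int) - 1) 0
      = PySem.List.pyGetD a.reverse 0 0 := by
    rw [pvGetD_reverse a 0 (by omega) (by omega)]
    norm_num
  rw [hlist, hstack0]
  have hmt := pvCore_map_tags (fun t => (a.length : Int) - 1 - t)
      ((PySem.List.pyRange 1 (a.length : Int) 1).map
        (fun i => (PySem.List.pyGetD a.reverse i 0, i)))
      [(PySem.List.pyGetD a.reverse 0 0, 0)]
      (by intro p hp; simp only [List.mem_singleton] at hp; subst hp; norm_num)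
      (by
        intro p hp
        simp only [List.mem_map] at hp
        obtain ⟨i, hi, rfl⟩ := hp
        have h2 := (PySem.List.mem_pyRange_one.mp hi).1
        simp
        omega)
  simp only [List.map_cons, List.map_nil] at hmt
  norm_num at hmt ⊢
  rw [hmt]

-- ---- both passes, in closed form ----
theorem pvLeftGreater_map (a : List Int) (h : a ≠ []) :
    leftGreater a = (PySem.List.pyRange 0 (a.length : Int) 1).map (fun i => ngL a i) := by
  rw [pvLeft_eq a h, pvScanB_emit]
  have h0 : PySem.List.pyRange ((0 : Int) - 1) (-1) (-1) = [] :=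
    PySem.List.pyRange_neg_one_eq_nil (by omega)
  have := pvEmit_left a a.length 0 le_rfl
  rw [h0] at this
  simpa using this

theorem pvRightGreater_map (a : List Int) (h : a ≠ []) :
    rightGreater a = (PySem.List.pyRange 0 (a.length : Int) 1).map (fun i => ngR a i) := by
  rw [pvRight_eq a h, pvScanB_emit]
  have hseen : PySem.List.pyRange (((a.length : Int) - 1) + 1) (a.length : Int) 1 = [] := by
    apply List.eq_nil_of_length_eq_zero
    rw [PySem.List.length_pyRange_one]
    omega
  have := pvEmit_right a a.length ((a.length : Int) - 1) (by omega)
  rw [hseen, show (a.length : Int) - 1 - (a.length : Int) = -1 by omega] at this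
  rw [this, PySem.List.pyRange_neg_one_eq_reverse, show (-1 : Int) + 1 = 0 by omega,
    show (a.length : Int) - 1 + 1 = (a.length : Int) by omega]
  rw [List.map_reverse, List.reverse_reverse]

theorem pvGetB_left (a : List Int) (i : Int) (h0 : 0 ≤ i) (h1 : i < (a.length : Int)) :
    PySem.List.pyGetD (pvLeftB a) i 0 = ngL a i := by
  rw [pvLeftB_eq_fold]
  have := (pvLeftFold_spec a a.length le_rfl).2 i.toNat 0 (by omega)
  rw [show ((i.toNat : Nat) : Int) = i by omega, if_pos (by omega)] at this
  exact this

theorem pvGetB_right (a : List Int) (i : Int) (h0 : 0 ≤ i) (h1 : i < (a.length : Int)) :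
    PySem.List.pyGetD (pvRightB a) i 0 = ngR a i := by
  rw [pvRightB_eq_fold]
  have := (pvRightFold_spec a a.length le_rfl).2 i.toNat 0 (by omega)
  rw [show ((i.toNat : Nat) : Int) = i by omega, if_pos (by omega)] at this
  exact this

-- ===== VERDICT (by name: the statement is the Claim_ definition above) =====
theorem nearestGreater_spec : Claim_equal_nearestGreater := by
  intro a _ hpre
  unfold Spec_nearestGreater nearestGreater nearestGreater_alt
  have hA : (fun (ans : List Int) (i : Int) =>
      if PySem.List.pyGetD (leftGreater a) i 0 = -1 then
        ans ++ [PySem.List.pyGetD (rightGreater a) i 0]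
      else if PySem.List.pyGetD (rightGreater a) i 0 = -1 then
        ans ++ [PySem.List.pyGetD (leftGreater a) i 0]
      else if i - PySem.List.pyGetD (leftGreater a) i 0
          ≤ PySem.List.pyGetD (rightGreater a) i 0 - i then
        ans ++ [PySem.List.pyGetD (leftGreater a) i 0]
      else ans ++ [PySem.List.pyGetD (rightGreater a) i 0])
    = (fun (ans : List Int) (i : Int) => ans ++
        [if PySem.List.pyGetD (leftGreater a) i 0 = -1 then PySem.List.pyGetD (rightGreater a) i 0
         else if PySem.List.pyGetD (rightGreater a) i 0 = -1 then PySem.List.pyGetD (leftGreater a) i 0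
         else if i - PySem.List.pyGetD (leftGreater a) i 0
             ≤ PySem.List.pyGetD (rightGreater a) i 0 - i then PySem.List.pyGetD (leftGreater a) i 0
         else PySem.List.pyGetD (rightGreater a) i 0]) := by
    funext ans i
    split_ifs <;> rfl
  have hB : (fun (ans : List Int) (i : Int) =>
      let l := PySem.List.pyGetD (pvLeftB a) i 0
      let r := PySem.List.pyGetD (pvRightB a) i 0
      if l = -1 then ans ++ [r]
      else if r = -1 ∨ i - l ≤ r - i then ans ++ [l]
      else ans ++ [r])
    = (fun (ans : List Int) (i : Int) => ans ++
        [let l := PySem.List.pyGetD (pvLeftB a) i 0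
         let r := PySem.List.pyGetD (pvRightB a) i 0
         if l = -1 then r else if r = -1 ∨ i - l ≤ r - i then l else r]) := by
    funext ans i
    dsimp only
    split_ifs <;> rfl
  rw [hA, hB, PySem.List.foldl_append_singleton_eq_map, PySem.List.foldl_append_singleton_eq_map]
  simp only [List.nil_append]
  apply List.map_congr_left
  intro i hi
  have hb := PySem.List.mem_pyRange_one.mp hi
  rw [pvLeftGreater_map a hpre, pvRightGreater_map a hpre,
    PySem.List.pyGetD_map_pyRange_of_nonneg _ _ _ _ hb.1 hb.2,
    PySem.List.pyGetD_map_pyRange_of_nonneg _ _ _ _ hb.1 hb.2,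
    pvGetB_left a i hb.1 hb.2, pvGetB_right a i hb.1 hb.2]
  by_cases hl : ngL a i = -1
  · simp [hl]
  · by_cases hr : ngR a i = -1
    · simp [hl, hr]
    · by_cases hc : i - ngL a i ≤ ngR a i - i
      · simp [hl, hr, hc]
      · simp [hl, hr, hc]
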